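-- pv_equiv track=rewrite | github.com/matheuslevi11/Batalha-Naval-Online | src/client/board.py | place_tips
-- ===== SOURCE A (Python) =====
-- def place_tips(positions, board):
--     for i, pos in enumerate(positions):
--         if i == 0:
--             x, y = pos[0], pos[1]
--             board[x][y]['tip'] = 1 # esquerda ou cima
--
--         if i == len(positions) - 1:
--             x, y = pos[0], pos[1]
--             board[x][y]['tip'] = 2 # direita ou baixo
--     return board
-- ===== SOURCE B (Python) =====
-- def place_tips(positions, board):
--     if not positions:
--         return board
--     x, y = positions[0][0], positions[0][1]
--     board[x][y]['tip'] = 1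
--     x, y = positions[-1][0], positions[-1][1]
--     board[x][y]['tip'] = 2
--     return board
-- ===== Notes on version B (the rewrite author's own statement) =====
-- stated objective: idiomatic
-- what changed: Replaces the enumerate loop over all positions with an empty guard and O(1) direct indexing of positions[0] and positions[-1].
import Mathlib
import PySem

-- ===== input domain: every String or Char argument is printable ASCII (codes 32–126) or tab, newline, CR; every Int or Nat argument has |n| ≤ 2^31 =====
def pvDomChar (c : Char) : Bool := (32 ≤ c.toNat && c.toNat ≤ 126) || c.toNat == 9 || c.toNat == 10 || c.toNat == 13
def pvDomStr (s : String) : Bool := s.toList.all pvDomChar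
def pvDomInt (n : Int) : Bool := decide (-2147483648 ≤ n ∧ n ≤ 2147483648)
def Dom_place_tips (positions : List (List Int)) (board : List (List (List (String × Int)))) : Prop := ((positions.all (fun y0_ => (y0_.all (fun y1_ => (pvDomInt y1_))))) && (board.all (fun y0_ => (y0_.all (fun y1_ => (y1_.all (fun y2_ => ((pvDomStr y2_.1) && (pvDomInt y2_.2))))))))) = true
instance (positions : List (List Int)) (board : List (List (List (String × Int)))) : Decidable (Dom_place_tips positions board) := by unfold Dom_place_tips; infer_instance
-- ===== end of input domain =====

-- B replaces A's enumerate loop by an empty-list guard plus O(1) direct indexing of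
-- positions[0] and positions[-1]; both Pythons mutate `board` in place — the equivalence
-- proved here is about the RETURN value (which is the same mutated board object).

-- ===== PORT A =====
-- board[x][y]['tip'] = v  on the association-list encoding of a dict:
-- overwrite the first "tip" entry in place, append if absent (exact Python dict-assignment rule)
def assocSetTip : List (String × Int) → Int → List (String × Int)
  | [], v => [("tip", v)]
  | (k, w) :: rest, v => if k = "tip" then (k, v) :: rest else (k, w) :: assocSetTip rest v

-- the shared statement  x, y = pos[0], pos[1]; board[x][y]['tip'] = v  (negative indices wrap;
-- out-of-range = IndexError in Python, excluded by Pre_; the port leaves board unchanged there)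
def setTip (board : List (List (List (String × Int)))) (pos : List Int) (v : Int) :
    List (List (List (String × Int))) :=
  match PySem.List.pyGet? pos 0, PySem.List.pyGet? pos 1 with
  | some x, some y =>
    match PySem.List.pyGet? board x with
    | some row =>
      match PySem.List.pyGet? row y with
      | some cell => PySem.List.pySetD board x (PySem.List.pySetD row y (assocSetTip cell v))
      | none => board
    | none => board
  | _, _ => board

-- one iteration of A's loop body (i the enumerate index, n = len(positions))
def stepA (n : Int) (b : List (List (List (String × Int)))) (ip : Int × List Int) :
    List (List (List (String × Int))) :=
  let b1 := if ip.1 = 0 then setTip b ip.2 1 else b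
  if ip.1 = n - 1 then setTip b1 ip.2 2 else b1

def place_tips (positions : List (List Int)) (board : List (List (List (String × Int)))) : List (List (List (String × Int))) :=
  (PySem.List.enumerate positions).foldl (stepA (PySem.List.len positions)) board

-- ===== PORT B =====
def place_tips_alt (positions : List (List Int)) (board : List (List (List (String × Int)))) : List (List (List (String × Int))) :=
  if positions.isEmpty then board
  else
    let b1 := match PySem.List.pyGet? positions 0 with
      | some p => setTip board p 1
      | none => board
    match PySem.List.pyGet? positions (-1) with
    | some p => setTip b1 p 2
    | none => b1

-- ===== PRECONDITION & SPEC =====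
-- a first/last position raises no IndexError: it has ≥ 2 entries and its (possibly negative)
-- coordinates hit a cell of board
def pvTipOK (board : List (List (List (String × Int)))) (pos : List Int) : Bool :=
  match PySem.List.pyGet? pos 0, PySem.List.pyGet? pos 1 with
  | some x, some y =>
    match PySem.List.pyGet? board x with
    | some row => (PySem.List.pyGet? row y).isSome
    | none => false
  | _, _ => false

-- Pre_ excludes exactly the inputs where Python A raises IndexError: a first or last position
-- that is too short or addresses a cell outside board.  Intermediate positions are never indexed.
def Pre_place_tips (positions : List (List Int)) (board : List (List (List (String × Int)))) : Prop :=
  (positions.head?.all (pvTipOK board) && positions.getLast?.all (pvTipOK board)) = true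
instance (positions : List (List Int)) (board : List (List (List (String × Int)))) : Decidable (Pre_place_tips positions board) := by unfold Pre_place_tips; infer_instance

def pvWitness_place_tips : List (List Int) × (List (List (List (String × Int)))) :=
  ([[0, 0], [0, 1]], [[[("tip", 0)], [("tip", 0)]]])

def Spec_place_tips (positions : List (List Int)) (board : List (List (List (String × Int)))) (out : List (List (List (String × Int)))) : Prop := out = place_tips_alt positions board
instance (positions : List (List Int)) (board : List (List (List (String × Int)))) (out : List (List (List (String × Int)))) : Decidable (Spec_place_tips positions board out) := by unfold Spec_place_tips; infer_instance

-- ===== CLAIM (what is proved, stated in full; the proofs are below) =====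
def Claim_equal_place_tips : Prop := ∀ (positions : List (List Int)) (board : List (List (List (String × Int)))), Dom_place_tips positions board → Pre_place_tips positions board → Spec_place_tips positions board (place_tips positions board)

-- ===== LEMMAS AND PROOFS =====

-- A's loop over the tail: indices k ≥ 1 never fire the i = 0 branch, and only the last
-- element fires the i = n-1 branch
theorem foldl_stepA_tail (n : Int) :
    ∀ (rest : List (List Int)) (k : Int) (b : List (List (List (String × Int)))),
      1 ≤ k → k + rest.length = n →
      (PySem.List.enumerate rest k).foldl (stepA n) b =
        match rest.getLast? with
        | some l => setTip b l 2
        | none => b := by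
  intro rest
  induction rest with
  | nil => intro k b _ _; simp [PySem.List.enumerate]
  | cons q rest' ih =>
    intro k b hk hn
    rw [PySem.List.enumerate_cons, List.foldl_cons]
    have hk0 : ¬ (k = 0) := by omega
    cases rest' with
    | nil =>
      simp only [List.length_cons, List.length_nil] at hn
      have hlast : k = n - 1 := by omega
      have h1 : ¬ (n - 1 = 0) := by omega
      simp [PySem.List.enumerate, stepA, hlast, h1]
    | cons r rs =>
      simp only [List.length_cons] at hn
      have hne : ¬ (k = n - 1) := by push_cast at hn; omega
      have hb : stepA n b (k, q) = b := by simp [stepA, hk0, hne]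
      rw [hb, ih (k + 1) b (by omega) (by simp only [List.length_cons]; push_cast at hn ⊢; omega)]
      simp

theorem place_tips_eq (positions : List (List Int)) (board : List (List (List (String × Int)))) :
    place_tips positions board = place_tips_alt positions board := by
  cases positions with
  | nil => simp [place_tips, place_tips_alt, PySem.List.enumerate]
  | cons p rest =>
    unfold place_tips place_tips_alt
    rw [PySem.List.enumerate_cons, List.foldl_cons]
    simp only [List.isEmpty_cons, if_neg Bool.false_ne_true, PySem.List.pyGet?_zero_cons,
      PySem.List.pyGet?_neg_one]
    cases rest with
    | nil =>
      simp [PySem.List.enumerate, stepA, PySem.List.len]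
    | cons r rs =>
      have h0 : stepA (PySem.List.len (p :: r :: rs)) board (0, p) = setTip board p 1 := by
        simp only [stepA, PySem.List.len_eq]
        rw [if_neg (by simp only [List.length_cons]; push_cast; omega)]
        simp
      rw [h0, foldl_stepA_tail (PySem.List.len (p :: r :: rs)) (r :: rs) (0 + 1) _ (by omega)
        (by simp only [PySem.List.len_eq, List.length_cons]; push_cast; omega)]
      rw [List.getLast?_cons_cons]

-- ===== VERDICT (by name: the statement is the Claim_ definition above) =====
theorem place_tips_spec : Claim_equal_place_tips := by
  intro positions board _ _
  exact place_tips_eq positions board
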